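-- pv_equiv track=rewrite | github.com/Divij-berry14/Python-with-Data-Structures | Lexicographically largest string.py | largest_string
-- ===== SOURCE A (Python) =====
-- def next_available_char(charset, start):
--     # Traverse charset from start-1
--     for i in range(start - 1,
--                    -1, -1):
--         if charset[i] > 0:
--             charset[i] -= 1
--             return chr(i + ord('a'))
--
--     # If no character can be
--     # appended
--     return '\0'
--
-- def largest_string(s, k):
--     n = len(s)
--
--     # Stores the frequency of
--     # characters
--     charset = [0] * 26
--
--     new_string = ""
--
--     for i in s:
--         charset[ord(i) -
--                 ord('a')] += 1
--
--     # Traverse the string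
--     for i in range(25, -1, -1):
--         count = 0
--
--         # Append larger character
--         while charset[i] > 0:
--             new_string += chr(i + ord('a'))
--
--             # Decrease count in
--             # charset
--             charset[i] -= 1
--
--             # Increase count
--             count += 1
--
--             # Check if count reached
--             # to charLimit
--             if (charset[i] > 0 and
--                     count == k):
--
--                 # Find nearest lower char
--                 next_ = next_available_char(charset, i)
--
--                 # If no character can be
--                 # appended
--                 if next_ == '\0':
--                     return new_string
--
--                 # Append nearest lower
--                 # character
--                 new_string += next_
--
--                 # Reset count for next
--                 # calculation
--                 count = 0
--
--     return new_string
-- ===== SOURCE B (Python) =====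
-- def largest_string(s, k):
--     cnt = [0] * 26
--     for c in s:
--         cnt[ord(c) - ord('a')] += 1
--     out = ""
--     prev = -1
--     run = 0
--     while True:
--         hi = -1
--         for i in range(25, -1, -1):
--             if cnt[i] > 0:
--                 hi = i
--                 break
--         if hi < 0:
--             break
--         if hi == prev and run == k:
--             sep = -1
--             for i in range(hi - 1, -1, -1):
--                 if cnt[i] > 0:
--                     sep = i
--                     break
--             if sep < 0:
--                 break
--             cnt[sep] -= 1
--             out += chr(sep + ord('a'))
--             prev = sep
--             run = 1
--         else:
--             cnt[hi] -= 1
--             out += chr(hi + ord('a'))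
--             run = (run if hi == prev else 0) + 1
--             prev = hi
--     return out
-- ===== Notes on version B (the rewrite author's own statement) =====
-- stated objective: alternative
-- what changed: Replaces A's nested outer-index/while loops plus the next_available_char helper by a single flat greedy loop over the count array that re-selects the highest available letter each step and tracks (prev, run) to decide when to insert a separator.
import Mathlib
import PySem

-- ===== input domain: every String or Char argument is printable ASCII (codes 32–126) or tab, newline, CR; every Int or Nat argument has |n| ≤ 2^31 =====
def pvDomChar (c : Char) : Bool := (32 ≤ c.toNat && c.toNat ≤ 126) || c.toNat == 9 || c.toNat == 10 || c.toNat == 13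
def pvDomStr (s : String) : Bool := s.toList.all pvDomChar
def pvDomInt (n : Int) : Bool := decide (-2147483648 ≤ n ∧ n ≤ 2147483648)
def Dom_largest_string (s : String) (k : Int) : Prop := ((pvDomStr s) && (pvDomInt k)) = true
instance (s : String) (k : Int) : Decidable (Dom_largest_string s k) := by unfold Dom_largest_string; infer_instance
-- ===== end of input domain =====

-- B replaces A's nested outer-index/while loops and helper by one flat greedy loop with (prev, run) state; same cost, alternative decomposition.

-- measure used by both ports' termination (sum of the positive counts)
def pvSumT (cs : List Int) : Nat := (cs.map Int.toNat).sum

theorem pvSumT_set_lt (cs : List Int) (i : Nat) (h : 0 < cs.getD i 0) :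
    pvSumT (cs.set i (cs.getD i 0 - 1)) < pvSumT cs := by
  induction cs generalizing i with
  | nil => simp [List.getD] at h
  | cons x xs ih =>
    cases i with
    | zero =>
      simp only [List.getD_cons_zero] at h
      simp only [List.getD_cons_zero, List.set_cons_zero, pvSumT, List.map_cons, List.sum_cons]
      omega
    | succ j =>
      simp only [List.getD_cons_succ] at h
      have := ih j h
      simp only [List.getD_cons_succ, List.set_cons_succ, pvSumT, List.map_cons, List.sum_cons]
      simp only [pvSumT] at this
      omega

-- ===== PORT A =====
-- helper next_available_char: scans indices start-1 .. 0 (all in range for the 26-list, so plain getD/set are exact)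
def pvNextAvail (cs : List Int) : Nat → List Int × Char
  | 0 => (cs, '\x00')
  | j + 1 =>
    if 0 < cs.getD j 0 then (cs.set j (cs.getD j 0 - 1), Char.ofNat (j + 97))
    else pvNextAvail cs j

theorem pvNextAvail_sumT_le (cs : List Int) (m : Nat) : pvSumT (pvNextAvail cs m).1 ≤ pvSumT cs := by
  induction m with
  | zero => simp [pvNextAvail]
  | succ j ih =>
    by_cases h : 0 < cs.getD j 0
    · simp only [pvNextAvail, if_pos h]
      exact Nat.le_of_lt (pvSumT_set_lt cs j h)
    · simp only [pvNextAvail, if_neg h]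
      exact ih

-- the while-loop of A at outer index i
def pvInnerA (k : Int) (i : Nat) (cs : List Int) (count : Int) (acc : String) : (List Int × String) ⊕ String :=
  if h : 0 < cs.getD i 0 then
    if 0 < (cs.set i (cs.getD i 0 - 1)).getD i 0 ∧ count + 1 = k then
      if (pvNextAvail (cs.set i (cs.getD i 0 - 1)) i).2 = '\x00' then
        Sum.inr (acc.push (Char.ofNat (i + 97)))
      else
        pvInnerA k i (pvNextAvail (cs.set i (cs.getD i 0 - 1)) i).1 0
          ((acc.push (Char.ofNat (i + 97))).push (pvNextAvail (cs.set i (cs.getD i 0 - 1)) i).2)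
    else pvInnerA k i (cs.set i (cs.getD i 0 - 1)) (count + 1) (acc.push (Char.ofNat (i + 97)))
  else Sum.inl (cs, acc)
termination_by pvSumT cs
decreasing_by
  · exact Nat.lt_of_le_of_lt (pvNextAvail_sumT_le _ i) (pvSumT_set_lt cs i h)
  · exact pvSumT_set_lt cs i h

-- the outer for-loop of A: fuel j handles indices j-1 .. 0
def pvOuterA (k : Int) : List Int → String → Nat → String
  | _, acc, 0 => acc
  | cs, acc, j + 1 =>
    match pvInnerA k j cs 0 acc with
    | Sum.inr s => s
    | Sum.inl (cs', acc') => pvOuterA k cs' acc' j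

-- frequency count: charset[ord(c)-97] += 1 with Python's negative-index wraparound (pySetD/pyGetD are exact where Python returns)
def pvCountsA (s : String) : List Int :=
  s.toList.foldl
    (fun cs c =>
      PySem.List.pySetD cs ((c.toNat : Int) - 97) (PySem.List.pyGetD cs ((c.toNat : Int) - 97) 0 + 1))
    (List.replicate 26 0)

def largest_string (s : String) (k : Int) : String :=
  pvOuterA k (pvCountsA s) "" 26

-- ===== PORT B =====
-- scan indices m-1 .. 0 for the highest positive count; -1 if none (Source B's break-scans)
def pvHiScan (cs : List Int) : Nat → Int
  | 0 => -1
  | j + 1 => if 0 < cs.getD j 0 then (j : Int) else pvHiScan cs j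

theorem pvHiScan_spec (cs : List Int) (m : Nat) (h : 0 ≤ pvHiScan cs m) :
    0 < cs.getD (pvHiScan cs m).toNat 0 ∧ (pvHiScan cs m).toNat < m := by
  induction m with
  | zero => simp [pvHiScan] at h
  | succ j ih =>
    by_cases hj : 0 < cs.getD j 0
    · simp only [pvHiScan, if_pos hj, Int.toNat_natCast]
      exact ⟨hj, Nat.lt_succ_self j⟩
    · simp only [pvHiScan, if_neg hj] at h ⊢
      exact ⟨(ih h).1, Nat.lt_succ_of_lt (ih h).2⟩

-- the single flat greedy loop of B
def pvLoopB (k : Int) (cs : List Int) (prev run : Int) (acc : String) : String :=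
  if h0 : pvHiScan cs 26 < 0 then acc
  else
    if pvHiScan cs 26 = prev ∧ run = k then
      if hs : pvHiScan cs (pvHiScan cs 26).toNat < 0 then acc
      else
        pvLoopB k
          (cs.set (pvHiScan cs (pvHiScan cs 26).toNat).toNat
            (cs.getD (pvHiScan cs (pvHiScan cs 26).toNat).toNat 0 - 1))
          (pvHiScan cs (pvHiScan cs 26).toNat) 1
          (acc.push (Char.ofNat ((pvHiScan cs (pvHiScan cs 26).toNat).toNat + 97)))
    else
      pvLoopB k (cs.set (pvHiScan cs 26).toNat (cs.getD (pvHiScan cs 26).toNat 0 - 1))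
        (pvHiScan cs 26) ((if pvHiScan cs 26 = prev then run else 0) + 1)
        (acc.push (Char.ofNat ((pvHiScan cs 26).toNat + 97)))
termination_by pvSumT cs
decreasing_by
  · exact pvSumT_set_lt cs _ (pvHiScan_spec cs _ (by omega)).1
  · exact pvSumT_set_lt cs _ (pvHiScan_spec cs 26 (by omega)).1

def pvCountsB (s : String) : List Int :=
  s.toList.foldl
    (fun cs c =>
      PySem.List.pySetD cs ((c.toNat : Int) - 97) (PySem.List.pyGetD cs ((c.toNat : Int) - 97) 0 + 1))
    (List.replicate 26 0)

def largest_string_alt (s : String) (k : Int) : String :=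
  pvLoopB k (pvCountsB s) (-1) 0 ""

-- ===== PRECONDITION & SPEC =====
-- Pre_ admits exactly the strings on which Python A returns: every character's code lies in [71,122]
-- (any other character makes `charset[ord(c)-97] += 1` raise IndexError in both A and B).
def Pre_largest_string (s : String) (k : Int) : Prop :=
  s.toList.all (fun c => 71 ≤ c.toNat && c.toNat ≤ 122) = true
instance (s : String) (k : Int) : Decidable (Pre_largest_string s k) := by
  unfold Pre_largest_string; infer_instance
def pvWitness_largest_string : String × Int := ("zzyab", 2)

def Spec_largest_string (s : String) (k : Int) (out : String) : Prop := out = largest_string_alt s k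
instance (s : String) (k : Int) (out : String) : Decidable (Spec_largest_string s k out) := by
  unfold Spec_largest_string; infer_instance

-- ===== CLAIM (what is proved, stated in full; the proofs are below) =====
def Claim_equal_largest_string : Prop := ∀ (s : String) (k : Int), Dom_largest_string s k → Pre_largest_string s k → Spec_largest_string s k (largest_string s k)

-- ===== LEMMAS AND PROOFS =====

theorem pvGetD_set_ne (cs : List Int) (i j : Nat) (x : Int) (h : j ≠ i) :
    (cs.set i x).getD j 0 = cs.getD j 0 := by
  simp [List.getD, List.getElem?_set_ne (Ne.symm h)]

theorem pvHiScan_neg (cs : List Int) (m : Nat) (h : ∀ j, j < m → cs.getD j 0 ≤ 0) :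
    pvHiScan cs m = -1 := by
  induction m with
  | zero => rfl
  | succ j ih =>
    have := h j (Nat.lt_succ_self j)
    simp only [pvHiScan, if_neg (by omega : ¬ 0 < cs.getD j 0)]
    exact ih fun j' hj' => h j' (Nat.lt_succ_of_lt hj')

theorem pvHiScan_eq (cs : List Int) (m i : Nat) (him : i < m) (hi : 0 < cs.getD i 0)
    (hz : ∀ j, i < j → j < m → cs.getD j 0 ≤ 0) : pvHiScan cs m = (i : Int) := by
  induction m with
  | zero => omega
  | succ j ih =>
    by_cases hji : j = i
    · subst hji; simp only [pvHiScan, if_pos hi]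
    · have hle : cs.getD j 0 ≤ 0 := by
        rcases Nat.lt_or_ge i j with h' | h'
        · exact hz j h' (Nat.lt_succ_self j)
        · omega
      simp only [pvHiScan, if_neg (by omega : ¬ 0 < cs.getD j 0)]
      exact ih (by omega) fun j' h1 h2 => hz j' h1 (Nat.lt_succ_of_lt h2)

theorem pvChar_ne_nul (j : Nat) (h : j < 26) : Char.ofNat (j + 97) ≠ '\x00' := by
  interval_cases j <;> decide

theorem pvNextAvail_eq (cs : List Int) (m : Nat) :
    pvNextAvail cs m =
      if pvHiScan cs m < 0 then (cs, '\x00')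
      else (cs.set (pvHiScan cs m).toNat (cs.getD (pvHiScan cs m).toNat 0 - 1),
            Char.ofNat ((pvHiScan cs m).toNat + 97)) := by
  induction m with
  | zero => simp [pvNextAvail, pvHiScan]
  | succ j ih =>
    by_cases hj : 0 < cs.getD j 0
    · simp only [pvNextAvail, pvHiScan, if_pos hj]
      rw [if_neg (by omega : ¬ ((j:Int) < 0)), Int.toNat_natCast]
    · simp only [pvNextAvail, pvHiScan, if_neg hj]
      exact ih

-- the continuation of A's inner loop: early return or fall through to the next outer index
def pvCont (k : Int) (i : Nat) : (List Int × String) ⊕ String → String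
  | Sum.inr s => s
  | Sum.inl (cs', acc') => pvOuterA k cs' acc' i

theorem pvOuterA_succ (k : Int) (cs : List Int) (acc : String) (j : Nat) :
    pvOuterA k cs acc (j + 1) = pvCont k j (pvInnerA k j cs 0 acc) := by
  rw [pvOuterA]
  rcases pvInnerA k j cs 0 acc with ⟨cs', acc'⟩ | s <;> rfl

-- the simulation invariant between A's (i, count) and B's (prev, run)
def pvInv (cs : List Int) (i : Nat) (count prev run k : Int) : Prop :=
  (prev = (i : Int) ∧ run = count ∧ (0 < cs.getD i 0 → count ≠ k)) ∨
  (count = 0 ∧ prev ≠ (i : Int) ∧ (0 < cs.getD i 0 ∨ prev < 0 ∨ (i : Int) < prev))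

theorem pvSim : ∀ (N : Nat) (cs : List Int) (i : Nat) (count prev run k : Int) (acc : String),
    pvSumT cs * 27 + i < N → cs.length = 26 → i < 26 →
    (∀ j, i < j → cs.getD j 0 ≤ 0) →
    pvInv cs i count prev run k →
    pvCont k i (pvInnerA k i cs count acc) = pvLoopB k cs prev run acc := by
  intro N
  induction N with
  | zero => intro cs i count prev run k acc hN; omega
  | succ N ih =>
    intro cs i count prev run k acc hN hlen hi hz hinv
    by_cases h : 0 < cs.getD i 0
    · -- A appends char i; B does the same step
      have hhi : pvHiScan cs 26 = (i : Int) := pvHiScan_eq cs 26 i hi h (fun j h1 _ => hz j h1)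
      have htest : ¬ (pvHiScan cs 26 = prev ∧ run = k) := by
        rw [hhi]
        rcases hinv with ⟨hp, hr, hk⟩ | ⟨_, hp, _⟩
        · rintro ⟨_, hrk⟩; exact hk h (by omega)
        · rintro ⟨hpe, _⟩; exact hp hpe.symm
      have hB : pvLoopB k cs prev run acc =
          pvLoopB k (cs.set i (cs.getD i 0 - 1)) (i : Int) ((if (i:Int) = prev then run else 0) + 1)
            (acc.push (Char.ofNat (i + 97))) := by
        rw [pvLoopB]
        rw [dif_neg (by rw [hhi]; omega), if_neg htest, hhi]
        simp
      rw [hB]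
      have hrun : (if (i:Int) = prev then run else 0) + 1 = count + 1 := by
        rcases hinv with ⟨hp, hr, _⟩ | ⟨hc, hp, _⟩
        · rw [if_pos hp.symm]; omega
        · rw [if_neg (fun he => hp he.symm)]; omega
      rw [hrun]
      set cs' := cs.set i (cs.getD i 0 - 1) with hcs'
      have hlen' : cs'.length = 26 := by simp [hcs', hlen]
      have hz' : ∀ j, i < j → cs'.getD j 0 ≤ 0 := by
        intro j hj
        rw [hcs', pvGetD_set_ne cs i j _ (by omega)]
        exact hz j hj
      have hsum' : pvSumT cs' < pvSumT cs := pvSumT_set_lt cs i h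
      rw [pvInnerA, dif_pos h]
      by_cases hc : 0 < cs'.getD i 0 ∧ count + 1 = k
      · -- A wants a separator
        rw [if_pos hc]
        rw [pvNextAvail_eq]
        have hhi' : pvHiScan cs' 26 = (i : Int) := pvHiScan_eq cs' 26 i hi hc.1 (fun j h1 _ => hz' j h1)
        by_cases hsep : pvHiScan cs' i < 0
        · rw [if_pos hsep]
          have h00 : ((cs', ('\x00' : Char)).2 = '\x00') := rfl
          rw [if_pos h00]
          rw [pvLoopB, hhi']
          simp only [Int.toNat_natCast]
          rw [dif_neg (by omega : ¬ ((i : Int) < 0)),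
            if_pos (show True ∧ count + 1 = k from ⟨trivial, hc.2⟩), dif_pos hsep]
          rfl
        · rw [if_neg hsep]
          have hsp := pvHiScan_spec cs' i (by omega)
          have hne : Char.ofNat ((pvHiScan cs' i).toNat + 97) ≠ '\x00' :=
            pvChar_ne_nul _ (by omega)
          rw [if_neg hne]
          set sn := (pvHiScan cs' i).toNat with hsn
          set cs'' := cs'.set sn (cs'.getD sn 0 - 1) with hcs''
          have hstep : pvLoopB k cs' (i : Int) (count + 1) (acc.push (Char.ofNat (i + 97))) =
              pvLoopB k cs'' (pvHiScan cs' i) 1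
                ((acc.push (Char.ofNat (i + 97))).push (Char.ofNat (sn + 97))) := by
            rw [pvLoopB, hhi']
            simp only [Int.toNat_natCast]
            rw [dif_neg (by omega : ¬ ((i : Int) < 0)),
              if_pos (show True ∧ count + 1 = k from ⟨trivial, hc.2⟩), dif_neg hsep]
          rw [hstep]
          apply ih cs'' i 0 (pvHiScan cs' i) 1 k
          · have h2 : pvSumT cs'' < pvSumT cs' := pvSumT_set_lt cs' sn hsp.1
            omega
          · simp [hcs'', hlen']
          · exact hi
          · intro j hj
            rw [pvGetD_set_ne cs' sn j _ (by omega)]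
            exact hz' j hj
          · right
            refine ⟨rfl, by omega, Or.inl ?_⟩
            rw [pvGetD_set_ne cs' sn i _ (by omega)]
            exact hc.1
      · -- no separator: A continues the while loop
        rw [if_neg hc]
        apply ih cs' i (count + 1) (i : Int) (count + 1) k
        · omega
        · exact hlen'
        · exact hi
        · exact hz'
        · left
          exact ⟨rfl, rfl, fun hp hk => hc ⟨hp, hk⟩⟩
    · -- cs[i] exhausted: A falls to the next outer index
      rw [pvInnerA, dif_neg h]
      show pvOuterA k cs acc i = pvLoopB k cs prev run acc
      cases i with
      | zero =>
        rw [pvLoopB, dif_pos]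
        · rfl
        · rw [pvHiScan_neg cs 26]
          · omega
          · intro j hj
            cases Nat.eq_zero_or_pos j with
            | inl h0 => subst h0; omega
            | inr hpos => exact hz j hpos
      | succ j =>
        rw [pvOuterA_succ]
        apply ih cs j 0 prev run k
        · omega
        · exact hlen
        · omega
        · intro j' hj'
          rcases Nat.lt_or_ge (j + 1) j' with h' | h'
          · exact hz j' h'
          · have : j' = j + 1 := by omega
            subst this; omega
        · right
          constructor
          · rfl
          constructor
          · rcases hinv with ⟨hp, _, _⟩ | ⟨_, hp, hd⟩
            · rw [hp]; intro he; omega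
            · rcases hd with hd | hd | hd
              · omega
              · intro he; omega
              · intro he; omega
          · rcases hinv with ⟨hp, _, _⟩ | ⟨_, _, hd⟩
            · right; right; rw [hp]; omega
            · rcases hd with hd | hd | hd
              · omega
              · right; left; exact hd
              · right; right; omega
  
theorem pvCounts_length (s : String) : (pvCountsA s).length = 26 := by
  unfold pvCountsA
  suffices h : ∀ (l : List Char) (init : List Int), init.length = 26 →
      (l.foldl (fun cs c =>
        PySem.List.pySetD cs ((c.toNat : Int) - 97)
          (PySem.List.pyGetD cs ((c.toNat : Int) - 97) 0 + 1)) init).length = 26 by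
    exact h _ _ (by simp)
  intro l
  induction l with
  | nil => intro init hinit; simpa using hinit
  | cons c cl ih =>
    intro init hinit
    simp only [List.foldl_cons]
    exact ih _ (by rw [PySem.List.length_pySetD]; exact hinit)

theorem pvCountsB_eq (s : String) : pvCountsB s = pvCountsA s := rfl

-- ===== VERDICT (by name: the statement is the Claim_ definition above) =====
theorem largest_string_spec : Claim_equal_largest_string := by
  intro s k _ _
  unfold Spec_largest_string largest_string largest_string_alt
  rw [pvCountsB_eq]
  rw [show (26:Nat) = 25 + 1 from rfl, pvOuterA_succ]
  apply pvSim (pvSumT (pvCountsA s) * 27 + 26)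
  · omega
  · exact pvCounts_length s
  · omega
  · intro j hj
    have : (pvCountsA s).getD j 0 = 0 := by
      apply List.getD_eq_default
      rw [pvCounts_length s]; omega
    omega
  · right
    refine ⟨rfl, by decide, Or.inr (Or.inl (by decide))⟩
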